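-- pv_equiv track=rewrite | github.com/ZhangLab-DeepNeuroCogLab/Integrating-Curricula-with-Replays | ciFAIR-100/Code/VaryBufferSel.py | _selectuniformly
-- ===== SOURCE A (Python) =====
-- def _selectuniformly(lis, number):
--     i = 0
--     count = 0
--     lislen = len(lis)
--     templis = []
--     while count < number:
--         templis.append(lis[i])
--         incre = (lislen-i)//(number-count)
--
--         i += incre
--         count += 1
--     return templis
-- ===== SOURCE B (Python) =====
-- def _selectuniformly(lis, number):
--     rev = lis[::-1]
--     out = []
--     while number > 0:
--         out.append(rev[-1])
--         gap = len(rev) // number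
--         if gap:
--             del rev[-gap:]
--         number -= 1
--     return out
-- ===== Notes on version B (the rewrite author's own statement) =====
-- stated objective: alternative
-- what changed: Instead of scanning a fixed list with a running index i, a running count and a precomputed length, B consumes a reversed copy of the list itself: it repeatedly reads the next pick off the end (rev[-1]), deletes the len(rev)//number elements it skips past, and decrements number, so the only state is the shrinking reversed list and the remaining pick count.
import Mathlib
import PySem

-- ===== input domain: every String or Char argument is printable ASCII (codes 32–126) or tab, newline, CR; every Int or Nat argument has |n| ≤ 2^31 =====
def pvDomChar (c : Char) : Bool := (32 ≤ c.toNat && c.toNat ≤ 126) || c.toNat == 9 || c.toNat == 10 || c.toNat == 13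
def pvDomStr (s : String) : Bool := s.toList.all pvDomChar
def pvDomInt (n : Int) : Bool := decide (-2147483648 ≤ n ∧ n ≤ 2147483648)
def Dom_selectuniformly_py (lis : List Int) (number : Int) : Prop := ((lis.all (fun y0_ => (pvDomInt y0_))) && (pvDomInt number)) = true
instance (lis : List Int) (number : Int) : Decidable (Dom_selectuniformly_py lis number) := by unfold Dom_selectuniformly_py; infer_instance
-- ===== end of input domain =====

-- B replaces A's index/count/length bookkeeping by consuming a reversed copy of the list itself
-- (read rev[-1], delete the skipped len(rev)//number elements off the end, decrement number):
-- an alternative decomposition of the same selection, comparable cost.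


-- ===== PORT A =====
-- A's while loop over state (i, count, templis); fuel = (number - count).toNat, which
-- decreases by 1 each iteration, so the fuel never runs out while count < number.
-- The `none` branch of pyGet? is Python's IndexError (reached only outside Pre_).
def selectAuxA (lis : List Int) (number : Int) : Nat → Int → Int → List Int → List Int
  | 0, _, _, templis => templis
  | fuel + 1, i, count, templis =>
    if count < number then
      match PySem.List.pyGet? lis i with
      | none => templis
      | some v =>
        let incre := PySem.Int.floordiv ((lis.length : Int) - i) (number - count)
        selectAuxA lis number fuel (i + incre) (count + 1) (templis ++ [v])
    else templis

def selectuniformly_py (lis : List Int) (number : Int) : List Int :=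
  selectAuxA lis number number.toNat 0 0 []

-- ===== PORT B =====
-- B's while loop over state (rev, number, out); fuel = number.toNat, decreasing by 1 per step.
-- rev[-1] is pyGet? rev (-1); 'del rev[-gap:]' (gap > 0) keeps rev[:len(rev)-gap], i.e. a slice.
def selectAuxB : Nat → List Int → Int → List Int → List Int
  | 0, _, _, out => out
  | fuel + 1, rev, number, out =>
    if 0 < number then
      match PySem.List.pyGet? rev (-1) with
      | none => out
      | some v =>
        let gap := PySem.Int.floordiv ((rev.length : Int) : Int) number
        let rev' := if gap = 0 then rev
          else PySem.List.slice rev none (some ((rev.length : Int) - gap))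
        selectAuxB fuel rev' (number - 1) (out ++ [v])
    else out

-- lis[::-1] is List.reverse (PySem.List.slice?_none_none_neg_one)
def selectuniformly_py_alt (lis : List Int) (number : Int) : List Int :=
  selectAuxB number.toNat lis.reverse number []

-- ===== PRECONDITION & SPEC =====
-- Pre_ excludes exactly the inputs where Python A raises IndexError: an empty list with number > 0.
def Pre_selectuniformly_py (lis : List Int) (number : Int) : Prop := lis = [] → number ≤ 0
instance (lis : List Int) (number : Int) : Decidable (Pre_selectuniformly_py lis number) := by unfold Pre_selectuniformly_py; infer_instance
def pvWitness_selectuniformly_py : List Int × Int := ([1, 2, 3], 2)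

def Spec_selectuniformly_py (lis : List Int) (number : Int) (out : List Int) : Prop := out = selectuniformly_py_alt lis number
instance (lis : List Int) (number : Int) (out : List Int) : Decidable (Spec_selectuniformly_py lis number out) := by unfold Spec_selectuniformly_py; infer_instance

-- ===== CLAIM (what is proved, stated in full; the proofs are below) =====
def Claim_equal_selectuniformly_py : Prop := ∀ (lis : List Int) (number : Int), Dom_selectuniformly_py lis number → Pre_selectuniformly_py lis number → Spec_selectuniformly_py lis number (selectuniformly_py lis number)

-- ===== LEMMAS AND PROOFS =====

-- A's loop at state (i, count) equals B's loop on the reversed tail (lis.drop i.toNat).reverse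
-- with number - count picks remaining: A keeps a position into the fixed list where B keeps the
-- (reversed) unprocessed rest of the list itself.
lemma selectAux_eq : ∀ (fuel : Nat) (lis : List Int) (number i count : Int) (acc : List Int),
    (number - count).toNat = fuel → 0 ≤ i → i ≤ (lis.length : Int) →
    selectAuxA lis number fuel i count acc
      = selectAuxB fuel (lis.drop i.toNat).reverse (number - count) acc := by
  intro fuel
  induction fuel with
  | zero => intro lis number i count acc _ _ _; simp [selectAuxA, selectAuxB]
  | succ f ih =>
    intro lis number i count acc hf hi hile
    have hlt : count < number := by omega
    have hpos : 0 < number - count := by omega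
    simp only [selectAuxA, selectAuxB, if_pos hlt, if_pos hpos]
    have hget : PySem.List.pyGet? (lis.drop i.toNat).reverse (-1) = PySem.List.pyGet? lis i := by
      rw [PySem.List.pyGet?_neg_one, PySem.List.pyGet?_of_nonneg _ hi,
        List.getLast?_reverse, List.head?_drop]
    rw [hget]
    cases hv : PySem.List.pyGet? lis i with
    | none => rfl
    | some v =>
      dsimp only
      have hne : lis.drop i.toNat ≠ [] := by
        intro h
        rw [PySem.List.pyGet?_of_nonneg _ hi, ← List.head?_drop, h] at hv
        simp at hv
      have hlen : (((lis.drop i.toNat).reverse.length : Nat) : Int) = (lis.length : Int) - i := by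
        simp [List.length_drop]; omega
      set incre := PySem.Int.floordiv ((lis.length : Int) - i) (number - count) with hincre
      have hfd : incre = ((lis.length : Int) - i) / (number - count) := by
        rw [hincre, PySem.Int.floordiv_eq_ediv_of_pos hpos]
      have h0 : 0 ≤ incre := by
        rw [hfd]; exact Int.ediv_nonneg (by omega) (by omega)
      have h1 : incre ≤ (lis.length : Int) - i := by
        rw [hfd]; exact Int.ediv_le_self _ (by omega)
      have hgap : PySem.Int.floordiv (((lis.drop i.toNat).reverse.length : Nat) : Int) (number - count)
          = incre := by rw [hlen, hincre]
      rw [hgap]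
      have hrev' : (if incre = 0 then (lis.drop i.toNat).reverse
            else PySem.List.slice (lis.drop i.toNat).reverse none
              (some ((((lis.drop i.toNat).reverse.length : Nat) : Int) - incre)))
          = (lis.drop (i + incre).toNat).reverse := by
        by_cases hz : incre = 0
        · rw [if_pos hz, hz, add_zero]
        · rw [if_neg hz,
            PySem.List.slice_to _ (by simp only [List.length_reverse, List.length_drop]; omega),
            List.take_reverse, List.drop_drop]
          congr 2
          simp only [List.length_reverse, List.length_drop]
          omega
      rw [hrev']
      have : number - count - 1 = number - (count + 1) := by omega
      rw [this]
      exact ih lis number (i + incre) (count + 1) (acc ++ [v]) (by omega) (by omega) (by omega)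

-- ===== VERDICT (by name: the statement is the Claim_ definition above) =====
theorem selectuniformly_py_spec : Claim_equal_selectuniformly_py := by
  intro lis number _ _
  unfold Spec_selectuniformly_py selectuniformly_py selectuniformly_py_alt
  have h := selectAux_eq number.toNat lis number 0 0 [] (by omega) le_rfl (by positivity)
  simpa using h
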